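-- pv_equiv track=rewrite | github.com/chaeminsoo/coding_test | book_hotel_room.py | solution
-- ===== SOURCE A (Python) =====
-- def solution(k, room_number):
--     ans = []
--     booked = set()
--     nxt_room = {}
--
--     def find_nxt_room(x):
--         if x in nxt_room:
--             if nxt_room[x] in booked:
--                 nxt_room[x] = find_nxt_room(nxt_room[x])
--             return nxt_room[x]
--         else:
--             nxt_room[x] = x+1
--             return nxt_room[x]
--
--     for i in room_number:
--         if i not in booked:
--             ans.append(i)
--             booked.add(i)
--             find_nxt_room(i)
--         else:
--             nr = find_nxt_room(i)
--             ans.append(nr)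
--             booked.add(nr)
--             find_nxt_room(nr)
--
--     return ans
-- ===== SOURCE B (Python) =====
-- def solution(k, room_number):
--     ans = []
--     booked = set()
--     for i in room_number:
--         room = i
--         while room in booked:
--             room += 1
--         ans.append(room)
--         booked.add(room)
--     return ans
-- ===== Notes on version B (the rewrite author's own statement) =====
-- stated objective: simpler
-- what changed: Replaces A's next-free-room pointer dictionary with path compression (a union-find-style find_nxt_room recursion) by a plain linear scan 'room = i; while room in booked: room += 1' over a single booked set.
import Mathlib
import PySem

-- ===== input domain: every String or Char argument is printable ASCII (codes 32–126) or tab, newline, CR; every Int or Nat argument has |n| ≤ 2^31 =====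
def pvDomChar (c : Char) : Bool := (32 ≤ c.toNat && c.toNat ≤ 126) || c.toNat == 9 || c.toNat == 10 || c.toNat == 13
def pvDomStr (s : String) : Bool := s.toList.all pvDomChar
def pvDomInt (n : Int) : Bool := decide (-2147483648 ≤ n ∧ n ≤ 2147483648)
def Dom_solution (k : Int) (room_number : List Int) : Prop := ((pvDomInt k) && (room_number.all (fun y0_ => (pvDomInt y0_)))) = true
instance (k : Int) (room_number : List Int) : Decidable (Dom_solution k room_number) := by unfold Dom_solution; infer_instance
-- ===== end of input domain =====

-- B replaces A's next-free-room pointer dictionary (union-find with path compression)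
-- by a plain linear scan over a 'booked' set; objective: simpler, same results.

-- ===== PORT A =====
-- find_nxt_room, with the dict threaded through; fuel only makes the recursion
-- structural (it is always chosen large enough, proved below — never reached).
def findNxt (booked : PySem.Set Int) (nxt : PySem.Dict Int Int) (x : Int) :
    Nat → Int × PySem.Dict Int Int
  | 0 => (x + 1, nxt)
  | fuel + 1 =>
    match nxt.get? x with
    | some y =>
      if PySem.Set.contains booked y then
        let r := findNxt booked nxt y fuel
        (r.1, r.2.insert x r.1)
      else (y, nxt)
    | none => (x + 1, nxt.insert x (x + 1))

def stepA (st : List Int × PySem.Set Int × PySem.Dict Int Int) (i : Int) :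
    List Int × PySem.Set Int × PySem.Dict Int Int :=
  let (ans, booked, nxt) := st
  if PySem.Set.contains booked i then
    let r := findNxt booked nxt i (nxt.size + 1)
    let nr := r.1
    let booked' := PySem.Set.add booked nr
    let r2 := findNxt booked' r.2 nr (r.2.size + 1)
    (ans ++ [nr], booked', r2.2)
  else
    let booked' := PySem.Set.add booked i
    let r := findNxt booked' nxt i (nxt.size + 1)
    (ans ++ [i], booked', r.2)

def solution (k : Int) (room_number : List Int) : List Int :=
  (room_number.foldl stepA ([], PySem.Set.empty, PySem.Dict.empty)).1

-- ===== PORT B =====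
-- 'while room in booked: room += 1'; fuel len(booked)+1 always suffices (proved below).
def scanFree (booked : PySem.Set Int) (room : Int) : Nat → Int
  | 0 => room
  | fuel + 1 =>
    if PySem.Set.contains booked room then scanFree booked (room + 1) fuel else room

def stepB (st : List Int × PySem.Set Int) (i : Int) : List Int × PySem.Set Int :=
  let room := scanFree st.2 i (st.2.length + 1)
  (st.1 ++ [room], PySem.Set.add st.2 room)

def solution_alt (k : Int) (room_number : List Int) : List Int :=
  (room_number.foldl stepB ([], PySem.Set.empty)).1

-- ===== PRECONDITION & SPEC =====
def Spec_solution (k : Int) (room_number : List Int) (out : List Int) : Prop := out = solution_alt k room_number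
instance (k : Int) (room_number : List Int) (out : List Int) : Decidable (Spec_solution k room_number out) := by unfold Spec_solution; infer_instance

-- ===== CLAIM (what is proved, stated in full; the proofs are below) =====
def Claim_equal_solution : Prop := ∀ (k : Int) (room_number : List Int), Dom_solution k room_number → Spec_solution k room_number (solution k room_number)

-- ===== LEMMAS AND PROOFS =====

-- every room strictly between x and nxt[x] is booked
def IntervalBooked (booked : PySem.Set Int) (a z : Int) : Prop :=
  ∀ w, a < w → w < z → w ∈ booked

def DInv (booked : PySem.Set Int) (nxt : PySem.Dict Int Int) : Prop :=
  ∀ x y, nxt.get? x = some y → x < y ∧ IntervalBooked booked x y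

-- the dict's key set is exactly the booked set
def KeysEq (booked : PySem.Set Int) (nxt : PySem.Dict Int Int) : Prop :=
  ∀ u, nxt.contains u = PySem.Set.contains booked u

def countGe (nxt : PySem.Dict Int Int) (x : Int) : Nat :=
  nxt.keys.countP (fun k => decide (x ≤ k))

theorem findNxt_none (booked : PySem.Set Int) (nxt : PySem.Dict Int Int) (x : Int)
    (fuel : Nat) (h : nxt.get? x = none) :
    findNxt booked nxt x (fuel + 1) = (x + 1, nxt.insert x (x + 1)) := by
  simp [findNxt, h]

theorem countP_lt_countP {α : Type} (l : List α) (p q : α → Bool) (a : α)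
    (ha : a ∈ l) (hpa : p a = true) (hqa : q a = false)
    (himp : ∀ b, q b = true → p b = true) : l.countP q < l.countP p := by
  induction l with
  | nil => cases ha
  | cons x xs ih =>
    have hmono : xs.countP q ≤ xs.countP p := List.countP_mono_left (fun b _ hb => himp b hb)
    rcases List.mem_cons.1 ha with h | h
    · subst h
      simp [hpa, hqa]
      omega
    · have := ih h
      simp only [List.countP_cons]
      by_cases hq : q x = true
      · simp [hq, himp x hq]; omega
      · simp only [Bool.not_eq_true] at hq
        simp only [hq]
        by_cases hp : p x = true <;> simp [hp] <;> omega

theorem countGe_lt (nxt : PySem.Dict Int Int) (x y : Int)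
    (hget : nxt.get? x = some y) (hxy : x < y) : countGe nxt y < countGe nxt x := by
  have hmem : x ∈ nxt.keys :=
    PySem.Dict.mem_keys_of_mem_items _ (PySem.Dict.mem_items_of_get?_eq_some _ hget)
  unfold countGe
  apply countP_lt_countP _ _ _ x hmem (by simp) (by simp; omega)
  intro b hb
  simp at hb ⊢
  omega

theorem findNxt_spec (fuel : Nat) (booked : PySem.Set Int) (nxt : PySem.Dict Int Int)
    (x : Int) (hInv : DInv booked nxt) (hK : KeysEq booked nxt)
    (hx : nxt.contains x = true) (hfuel : countGe nxt x < fuel) :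
    x < (findNxt booked nxt x fuel).1 ∧
    IntervalBooked booked x (findNxt booked nxt x fuel).1 ∧
    (findNxt booked nxt x fuel).1 ∉ booked ∧
    (∀ u, (findNxt booked nxt x fuel).2.contains u = nxt.contains u) ∧
    DInv booked (findNxt booked nxt x fuel).2 := by
  induction fuel generalizing nxt x with
  | zero => omega
  | succ fuel ih =>
    have hsome : (nxt.get? x).isSome := by
      rw [← PySem.Dict.contains_eq_isSome_get?]; exact hx
    obtain ⟨y, hy⟩ := Option.isSome_iff_exists.1 hsome
    obtain ⟨hxy, hintv⟩ := hInv x y hy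
    by_cases hby : PySem.Set.contains booked y = true
    · have hy' : nxt.contains y = true := by rw [hK]; exact hby
      have hfuel' : countGe nxt y < fuel := by
        have := countGe_lt nxt x y hy hxy
        omega
      obtain ⟨h1, h2, h3, h4, h5⟩ := ih nxt y hInv hK hy' hfuel'
      have hred : findNxt booked nxt x (fuel + 1) =
          ((findNxt booked nxt y fuel).1,
           (findNxt booked nxt y fuel).2.insert x (findNxt booked nxt y fuel).1) := by
        simp only [findNxt, hy, hby, if_pos]
      rw [hred]
      have hintv2 : IntervalBooked booked x (findNxt booked nxt y fuel).1 := by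
        intro w hw1 hw2
        rcases lt_trichotomy w y with h | h | h
        · exact hintv w hw1 h
        · subst h; exact (PySem.Set.contains_iff _ _).1 hby
        · exact h2 w h hw2
      refine ⟨lt_trans hxy h1, hintv2, h3, ?_, ?_⟩
      · intro u
        rw [PySem.Dict.contains_insert, h4 u]
        by_cases hux : u = x
        · subst hux; simp [hx]
        · simp [hux]
      · intro u v huv
        rw [PySem.Dict.get?_insert] at huv
        by_cases hux : u = x
        · rw [if_pos hux] at huv
          cases huv
          subst hux
          exact ⟨lt_trans hxy h1, hintv2⟩
        · rw [if_neg hux] at huv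
          exact h5 u v huv
    · have hred : findNxt booked nxt x (fuel + 1) = (y, nxt) := by
        simp only [findNxt, hy]
        rw [if_neg hby]
      rw [hred]
      refine ⟨hxy, hintv, ?_, fun u => rfl, hInv⟩
      intro hmem
      exact hby ((PySem.Set.contains_iff _ _).2 hmem)

theorem scanFree_eq (fuel : Nat) (booked : PySem.Set Int) (room z : Int)
    (h1 : room ≤ z) (h2 : z ∉ booked)
    (h3 : ∀ w, room ≤ w → w < z → w ∈ booked)
    (hfuel : z < room + (fuel : Int)) : scanFree booked room fuel = z := by
  induction fuel generalizing room with
  | zero => simp at hfuel; omega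
  | succ fuel ih =>
    rw [scanFree]
    by_cases hb : room ∈ booked
    · have hlt : room < z := by
        rcases lt_or_eq_of_le h1 with h | h
        · exact h
        · exact absurd (h ▸ hb) h2
      rw [if_pos ((PySem.Set.contains_iff _ _).2 hb)]
      exact ih (room + 1) (by omega) (fun w hw1 hw2 => h3 w (by omega) hw2)
        (by push_cast at hfuel ⊢; omega)
    · have : room = z := by
        by_contra hne
        exact hb (h3 room le_rfl (by omega))
      rw [if_neg (by simpa [PySem.Set.contains_iff _ _] using hb)]
      exact this

-- pigeonhole bound: the booked interval [i, z) injects into the nodup 'booked' list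
theorem interval_length_le (booked : PySem.Set Int) (hnd : booked.Nodup) (i z : Int)
    (h : ∀ w, i ≤ w → w < z → w ∈ booked) : z ≤ i + booked.length := by
  by_contra hc
  push_neg at hc
  have hsub : Finset.Ico i z ⊆ booked.toFinset := by
    intro w hw
    rw [Finset.mem_Ico] at hw
    exact List.mem_toFinset.2 (h w hw.1 hw.2)
  have hcard := Finset.card_le_card hsub
  rw [Int.card_Ico, List.toFinset_card_of_nodup hnd] at hcard
  omega

theorem step_eq (ans : List Int) (booked : PySem.Set Int) (nxt : PySem.Dict Int Int)
    (i : Int) (hnd : booked.Nodup) (hInv : DInv booked nxt) (hK : KeysEq booked nxt) :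
    (stepA (ans, booked, nxt) i).1 = (stepB (ans, booked) i).1 ∧
    (stepA (ans, booked, nxt) i).2.1 = (stepB (ans, booked) i).2 ∧
    (stepB (ans, booked) i).2.Nodup ∧
    DInv (stepA (ans, booked, nxt) i).2.1 (stepA (ans, booked, nxt) i).2.2 ∧
    KeysEq (stepA (ans, booked, nxt) i).2.1 (stepA (ans, booked, nxt) i).2.2 := by
  by_cases hb : PySem.Set.contains booked i = true
  · -- room i already booked: A follows the pointer chain, B scans
    have hx : nxt.contains i = true := by rw [hK]; exact hb
    have hfuel : countGe nxt i < nxt.size + 1 := by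
      have h1 : countGe nxt i ≤ nxt.keys.length := List.countP_le_length
      have h2 : nxt.keys.length = nxt.size := by
        simp [PySem.Dict.keys, PySem.Dict.size]
      omega
    obtain ⟨hlt, hintv, hfree, hkeys, hInv1⟩ :=
      findNxt_spec (nxt.size + 1) booked nxt i hInv hK hx hfuel
    set r := findNxt booked nxt i (nxt.size + 1) with hr
    have hcf : PySem.Set.contains booked r.1 = false := by
      rw [← Bool.not_eq_true]
      intro hc
      exact hfree ((PySem.Set.contains_iff _ _).1 hc)
    have hnone2 : r.2.get? r.1 = none := by
      have h := hkeys r.1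
      rw [hK r.1, hcf] at h
      rw [PySem.Dict.contains_eq_isSome_get?] at h
      cases hg : r.2.get? r.1 with
      | none => rfl
      | some v => rw [hg] at h; simp at h
    have hA : stepA (ans, booked, nxt) i =
        (ans ++ [r.1], PySem.Set.add booked r.1, r.2.insert r.1 (r.1 + 1)) := by
      simp only [stepA, hb, if_true, ← hr]
      rw [findNxt_none _ _ _ _ hnone2]
    have h3 : ∀ w, i ≤ w → w < r.1 → w ∈ booked := by
      intro w hw1 hw2
      rcases eq_or_lt_of_le hw1 with h | h
      · rw [← h]; exact (PySem.Set.contains_iff _ _).1 hb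
      · exact hintv w h hw2
    have hlen := interval_length_le booked hnd i r.1 h3
    have hscan : scanFree booked i (booked.length + 1) = r.1 :=
      scanFree_eq _ booked i r.1 (le_of_lt hlt) hfree h3 (by push_cast; omega)
    have hB : stepB (ans, booked) i = (ans ++ [r.1], PySem.Set.add booked r.1) := by
      simp only [stepB, hscan]
    rw [hA, hB]
    refine ⟨rfl, rfl, PySem.Set.nodup_add _ _ hnd, ?_, ?_⟩
    · intro u v huv
      rw [PySem.Dict.get?_insert] at huv
      by_cases hur : u = r.1
      · rw [if_pos hur] at huv
        cases huv
        subst hur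
        exact ⟨by omega, fun w hw1 hw2 => absurd hw2 (by omega)⟩
      · rw [if_neg hur] at huv
        obtain ⟨h1, h2⟩ := hInv1 u v huv
        exact ⟨h1, fun w hw1 hw2 => (PySem.Set.mem_add _ _ _).2 (Or.inl (h2 w hw1 hw2))⟩
    · intro u
      rw [PySem.Dict.contains_insert, hkeys u, hK u, Bool.eq_iff_iff]
      simp only [Bool.or_eq_true, beq_iff_eq, PySem.Set.contains_iff, PySem.Set.mem_add]
      tauto
  · -- room i free: both book i itself
    rw [Bool.not_eq_true] at hb
    have hnone : nxt.get? i = none := by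
      have h := hK i
      rw [hb] at h
      rw [PySem.Dict.contains_eq_isSome_get?] at h
      cases hg : nxt.get? i with
      | none => rfl
      | some v => rw [hg] at h; simp at h
    have hA : stepA (ans, booked, nxt) i =
        (ans ++ [i], PySem.Set.add booked i, nxt.insert i (i + 1)) := by
      simp only [stepA, hb, Bool.false_eq_true, if_false]
      rw [findNxt_none _ _ _ _ hnone]
    have hB : stepB (ans, booked) i = (ans ++ [i], PySem.Set.add booked i) := by
      have hscan : scanFree booked i (booked.length + 1) = i := by
        rw [scanFree, hb]
        simp
      simp only [stepB, hscan]
    rw [hA, hB]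
    refine ⟨rfl, rfl, PySem.Set.nodup_add _ _ hnd, ?_, ?_⟩
    · intro u v huv
      rw [PySem.Dict.get?_insert] at huv
      by_cases hui : u = i
      · rw [if_pos hui] at huv
        cases huv
        subst hui
        exact ⟨by omega, fun w hw1 hw2 => absurd hw2 (by omega)⟩
      · rw [if_neg hui] at huv
        obtain ⟨h1, h2⟩ := hInv u v huv
        exact ⟨h1, fun w hw1 hw2 => (PySem.Set.mem_add _ _ _).2 (Or.inl (h2 w hw1 hw2))⟩
    · intro u
      rw [PySem.Dict.contains_insert, hK u, Bool.eq_iff_iff]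
      simp only [Bool.or_eq_true, beq_iff_eq, PySem.Set.contains_iff, PySem.Set.mem_add]
      tauto

theorem loop_eq (l : List Int) (ans : List Int) (booked : PySem.Set Int)
    (nxt : PySem.Dict Int Int) (hnd : booked.Nodup) (hInv : DInv booked nxt)
    (hK : KeysEq booked nxt) :
    (l.foldl stepA (ans, booked, nxt)).1 = (l.foldl stepB (ans, booked)).1 := by
  induction l generalizing ans booked nxt with
  | nil => rfl
  | cons i t ih =>
    obtain ⟨he1, he2, hnd', hInv', hK'⟩ := step_eq ans booked nxt i hnd hInv hK
    simp only [List.foldl_cons]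
    have hsplit : stepA (ans, booked, nxt) i =
        ((stepB (ans, booked) i).1, (stepB (ans, booked) i).2,
         (stepA (ans, booked, nxt) i).2.2) := by
      rw [← he1, ← he2]
    rw [he2] at hInv' hK'
    rw [hsplit]
    exact ih (stepB (ans, booked) i).1 (stepB (ans, booked) i).2
      (stepA (ans, booked, nxt) i).2.2 hnd' hInv' hK'

-- ===== VERDICT (by name: the statement is the Claim_ definition above) =====
theorem solution_spec : Claim_equal_solution := by
  intro k room_number _
  unfold Spec_solution solution solution_alt
  exact loop_eq room_number [] PySem.Set.empty PySem.Dict.empty List.nodup_nil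
    (fun x y h => by simp [PySem.Dict.get?_empty] at h)
    (fun u => by simp [PySem.Dict.contains_empty, PySem.Set.empty])
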